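-- pv_equiv track=rewrite | github.com/Arm-China/Compass_Unified_Parser | AIPUBuilder/Parser/graph/pattern_match.py | edge_feasibility
-- ===== SOURCE A (Python) =====
-- from itertools import product, permutations, combinations
--
-- def edge_feasibility(g1_edge, g2_edge):
--     def _check_edge(e1, e2):
--         src_check = True if e2['src_out_port'] is None else e1['src_out_port'] == e2['src_out_port']
--         dst_check = True if e2['dst_in_port'] is None else e1['dst_in_port'] == e2['dst_in_port']
--         return src_check and dst_check
--
--     g1_edge = dict(g1_edge)
--     g2_edge = dict(g2_edge)
--     if len(g2_edge) == 0:
--         return True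
--     elif len(g1_edge) < len(g2_edge):
--         return False
--     elif len(g1_edge) == 1 and len(g2_edge) == 1:
--         g1_edge = list(g1_edge.values())[0]
--         g2_edge = list(g2_edge.values())[0]
--         return _check_edge(g1_edge, g2_edge)
--     else:
--         found_match = False
--         g1_edge_list = list(g1_edge.values())
--         g2_edge_list = list(g2_edge.values())
--         r = len(g2_edge_list)
--         for part_g1_edge, part_g2_edge in product(list(combinations(g1_edge_list, r)), list(permutations(g2_edge_list, r))):
--             part_found_not_match = False
--             part_g1_edge = sorted(part_g1_edge, key=lambda x: (x['src_out_port'], x['dst_in_port']))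
--             for meta_g1_edge, meta_g2_edge in zip(part_g1_edge, part_g2_edge):
--                 meta_check_ret = _check_edge(meta_g1_edge, meta_g2_edge)
--                 if not meta_check_ret:
--                     part_found_not_match = True
--                     break
--             if part_found_not_match:
--                 continue
--             else:
--                 found_match = True
--                 break
--         return found_match
-- ===== SOURCE B (Python) =====
-- def edge_feasibility(g1_edge, g2_edge):
--     # Depth-first injective matching of g2 edges to g1 edges (backtracking),
--     # instead of enumerating every (combination x permutation) pair.
--     def _ok(e1, e2):
--         sp = e2['src_out_port']
--         dp = e2['dst_in_port']
--         return (sp is None or e1['src_out_port'] == sp) and \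
--                (dp is None or e1['dst_in_port'] == dp)
--
--     g1 = list(dict(g1_edge).values())
--     g2 = list(dict(g2_edge).values())
--     if len(g2) > len(g1):
--         return False
--
--     def rec(avail, k):
--         if k == len(g2):
--             return True
--         e2 = g2[k]
--         for i in range(len(avail)):
--             if _ok(avail[i], e2) and rec(avail[:i] + avail[i + 1:], k + 1):
--                 return True
--         return False
--
--     return rec(g1, 0)
-- ===== Notes on version B (the rewrite author's own statement) =====
-- stated objective: alternative
-- what changed: Replaces A's scan over the materialized product of all C(n,m) g1-edge combinations and all m! g2-edge permutations (re-sorting each combination) by a depth-first backtracking search that assigns g2 edges one by one to still-unused g1 edges and abandons a branch as soon as a prefix is infeasible, never materializing the product.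
import Mathlib
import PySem

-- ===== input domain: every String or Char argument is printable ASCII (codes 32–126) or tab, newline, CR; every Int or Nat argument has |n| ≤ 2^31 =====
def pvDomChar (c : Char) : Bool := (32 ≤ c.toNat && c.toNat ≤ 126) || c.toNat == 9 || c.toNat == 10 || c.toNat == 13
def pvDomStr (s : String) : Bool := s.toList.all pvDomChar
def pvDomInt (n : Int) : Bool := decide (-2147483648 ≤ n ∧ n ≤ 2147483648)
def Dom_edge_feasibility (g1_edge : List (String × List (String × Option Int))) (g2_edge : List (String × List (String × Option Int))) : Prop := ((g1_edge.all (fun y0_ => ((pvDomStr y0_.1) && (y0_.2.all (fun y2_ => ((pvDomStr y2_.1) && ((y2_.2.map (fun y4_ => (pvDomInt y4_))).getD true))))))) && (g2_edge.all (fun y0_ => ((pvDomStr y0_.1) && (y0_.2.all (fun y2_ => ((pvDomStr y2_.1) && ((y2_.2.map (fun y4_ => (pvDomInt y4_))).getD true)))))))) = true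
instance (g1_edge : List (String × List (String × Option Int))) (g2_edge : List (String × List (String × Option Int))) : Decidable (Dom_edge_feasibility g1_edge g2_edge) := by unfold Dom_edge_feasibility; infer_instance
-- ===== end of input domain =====

-- B replaces A's scan of the materialized combinations×permutations product by depth-first
-- backtracking that assigns g2 edges to unused g1 edges with prefix pruning; equal return
-- value is proved on Pre_ (where the Python A returns instead of raising KeyError/TypeError).

-- ===== PORT A =====

-- e[k] as first-match association-list lookup; '.getD none' stands where Python would raise
-- KeyError (those inputs are outside Pre_).
def pvPort (e : List (String × Option Int)) (k : String) : Option Int :=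
  ((PySem.Dict.mk e).get? k).getD none

-- _check_edge of A: both checks are computed, then conjoined.
def pvCheckA (e1 e2 : List (String × Option Int)) : Bool :=
  let srcCheck := if pvPort e2 "src_out_port" = none then true
                  else pvPort e1 "src_out_port" == pvPort e2 "src_out_port"
  let dstCheck := if pvPort e2 "dst_in_port" = none then true
                  else pvPort e1 "dst_in_port" == pvPort e2 "dst_in_port"
  srcCheck && dstCheck

-- itertools.combinations(l, r) (lexicographic order of index subsets).
def pvCombinations {α : Type} : List α → Nat → List (List α)
  | _, 0 => [[]]
  | [], _ + 1 => []
  | x :: xs, r + 1 => (pvCombinations xs r).map (x :: ·) ++ pvCombinations xs (r + 1)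

-- sorted(part, key=lambda x: (x['src_out_port'], x['dst_in_port'])); under Pre_ every g1 port
-- is 'some int', so the Int keys '(…).getD 0' compare exactly as Python's tuples of ints do
-- (on a None or missing port Python raises TypeError/KeyError — outside Pre_).
def pvSortPart (c : List (List (String × Option Int))) : List (List (String × Option Int)) :=
  PySem.List.sorted2 c (fun e => (pvPort e "src_out_port").getD 0)
    (fun e => (pvPort e "dst_in_port").getD 0)

-- the inner 'for … zip … break' loop: all zipped pairs pass _check_edge
def pvZipAll (c p : List (List (String × Option Int))) : Bool :=
  (c.zip p).all (fun q => pvCheckA q.1 q.2)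

def edge_feasibility (g1_edge : List (String × List (String × Option Int))) (g2_edge : List (String × List (String × Option Int))) : Bool :=
  let d1 := PySem.Dict.ofList g1_edge
  let d2 := PySem.Dict.ofList g2_edge
  if d2.size = 0 then true
  else if d1.size < d2.size then false
  else if d1.size = 1 ∧ d2.size = 1 then
    pvCheckA (d1.values.getD 0 []) (d2.values.getD 0 [])
  else
    let l1 := d1.values
    let l2 := d2.values
    let r := l2.length
    -- for part_g1, part_g2 in product(combinations(l1, r), permutations(l2, r)): … break
    ((pvCombinations l1 r).flatMap
      (fun c => (PySem.List.permutations l2 r).map (fun p => (c, p)))).any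
      (fun cp => pvZipAll (pvSortPart cp.1) cp.2)

-- ===== PORT B =====

-- _ok of B: short-circuit form.
def pvCheckB (e1 e2 : List (String × Option Int)) : Bool :=
  let sp := pvPort e2 "src_out_port"
  let dp := pvPort e2 "dst_in_port"
  (sp == none || pvPort e1 "src_out_port" == sp) &&
  (dp == none || pvPort e1 "dst_in_port" == dp)

-- rec(avail, k): try every still-available g1 edge for the next g2 edge.
def pvRec (avail : List (List (String × Option Int))) :
    List (List (String × Option Int)) → Bool
  | [] => true
  | e2 :: rest =>
    (List.range avail.length).any
      (fun i => pvCheckB (avail.getD i []) e2 &&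
        pvRec (avail.take i ++ avail.drop (i + 1)) rest)

def edge_feasibility_alt (g1_edge : List (String × List (String × Option Int))) (g2_edge : List (String × List (String × Option Int))) : Bool :=
  let g1 := (PySem.Dict.ofList g1_edge).values
  let g2 := (PySem.Dict.ofList g2_edge).values
  if g1.length < g2.length then false
  else pvRec g1 g2

-- ===== PRECONDITION & SPEC =====

def pvHasKeys (e : List (String × Option Int)) : Bool :=
  (PySem.Dict.mk e).contains "src_out_port" && (PySem.Dict.mk e).contains "dst_in_port"

def pvIntPorts (e : List (String × Option Int)) : Bool :=
  ((PySem.Dict.mk e).get? "src_out_port").getD none != none &&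
  ((PySem.Dict.mk e).get? "dst_in_port").getD none != none

-- Pre_ excludes inputs on which the Python A raises: with g2 nonempty and not more numerous
-- than g1, every g2 edge must carry both port keys (else KeyError) and every g1 edge both
-- keys with integer (non-None) ports (else KeyError, or TypeError when sorting compares None
-- with an int).  It is slightly narrower than A's raising set (A can return before touching a
-- defective g1 edge, e.g. when len(g2) == 1); on such excluded inputs A and B agree anyway.
def Pre_edge_feasibility (g1_edge : List (String × List (String × Option Int))) (g2_edge : List (String × List (String × Option Int))) : Prop :=
  (PySem.Dict.ofList g2_edge).values = [] ∨
  (PySem.Dict.ofList g1_edge).values.length < (PySem.Dict.ofList g2_edge).values.length ∨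
  ((∀ e ∈ (PySem.Dict.ofList g2_edge).values, pvHasKeys e = true) ∧
   (∀ e ∈ (PySem.Dict.ofList g1_edge).values, pvIntPorts e = true))
instance (g1_edge : List (String × List (String × Option Int))) (g2_edge : List (String × List (String × Option Int))) : Decidable (Pre_edge_feasibility g1_edge g2_edge) := by unfold Pre_edge_feasibility; infer_instance

def pvWitness_edge_feasibility : (List (String × List (String × Option Int))) × (List (String × List (String × Option Int))) :=
  ([("a", [("src_out_port", some 0), ("dst_in_port", some 0)])],
   [("x", [("src_out_port", none), ("dst_in_port", none)])])

def Spec_edge_feasibility (g1_edge : List (String × List (String × Option Int))) (g2_edge : List (String × List (String × Option Int))) (out : Bool) : Prop := out = edge_feasibility_alt g1_edge g2_edge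
instance (g1_edge : List (String × List (String × Option Int))) (g2_edge : List (String × List (String × Option Int))) (out : Bool) : Decidable (Spec_edge_feasibility g1_edge g2_edge out) := by unfold Spec_edge_feasibility; infer_instance

-- ===== CLAIM (what is proved, stated in full; the proofs are below) =====
def Claim_equal_edge_feasibility : Prop := ∀ (g1_edge : List (String × List (String × Option Int))) (g2_edge : List (String × List (String × Option Int))), Dom_edge_feasibility g1_edge g2_edge → Pre_edge_feasibility g1_edge g2_edge → Spec_edge_feasibility g1_edge g2_edge (edge_feasibility g1_edge g2_edge)

-- ===== LEMMAS AND PROOFS =====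

-- The two edge checks agree.
theorem pvCheckA_eq_pvCheckB (e1 e2 : List (String × Option Int)) :
    pvCheckA e1 e2 = pvCheckB e1 e2 := by
  unfold pvCheckA pvCheckB
  rcases h1 : pvPort e2 "src_out_port" with _ | v <;>
    rcases h2 : pvPort e2 "dst_in_port" with _ | w <;> simp

-- abbreviation used throughout the proofs
def pvChk (e1 e2 : List (String × Option Int)) : Prop := pvCheckB e1 e2 = true

-- membership in pvCombinations = sublists of the given length
theorem mem_pvCombinations {α : Type} : ∀ (l : List α) (r : Nat) (c : List α),
    c ∈ pvCombinations l r ↔ c.Sublist l ∧ c.length = r := by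
  intro l
  induction l with
  | nil => intro r c; cases r with
    | zero => simp [pvCombinations, List.sublist_nil, List.length_eq_zero_iff]
    | succ r => simp [pvCombinations, List.sublist_nil]; rintro rfl; simp
  | cons x xs ih =>
    intro r c
    cases r with
    | zero =>
      simp [pvCombinations, List.length_eq_zero_iff]
      rintro rfl; exact List.nil_sublist _
    | succ r =>
      simp only [pvCombinations, List.mem_append, List.mem_map, ih]
      constructor
      · rintro (⟨c', ⟨hs, hl⟩, rfl⟩ | ⟨hs, hl⟩)
        · exact ⟨List.Sublist.cons₂ x hs, by simp [hl]⟩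
        · exact ⟨List.Sublist.cons x hs, hl⟩
      · rintro ⟨hs, hl⟩
        cases hs with
        | cons _ h => exact Or.inr ⟨h, hl⟩
        | cons₂ _ h => exact Or.inl ⟨_, ⟨h, by simpa using hl⟩, rfl⟩

-- the successor-step equation of PySem.List.permutations (itertools order)
theorem pvPerms_succ {α : Type} (l : List α) (n : Nat) :
    PySem.List.permutations l (n+1) =
      (List.range l.length).flatMap
        (fun i => match l[i]? with
          | none => []
          | some x => (PySem.List.permutations (l.eraseIdx i) n).map (x :: ·)) := by
  rw [PySem.List.permutations]; rfl

-- membership in PySem.List.permutations l l.length = permutations of l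
theorem mem_pvPermutations {α : Type} [DecidableEq α] :
    ∀ (n : Nat) (l p : List α), l.length = n → (p ∈ PySem.List.permutations l n ↔ p.Perm l) := by
  intro n
  induction n with
  | zero =>
    intro l p hl
    rw [List.length_eq_zero_iff] at hl; subst hl
    simp [PySem.List.permutations, List.perm_nil]
  | succ n ih =>
    intro l p hl
    rw [pvPerms_succ]
    simp only [List.mem_flatMap, List.mem_range]
    constructor
    · rintro ⟨i, hi, hmem⟩
      rw [List.getElem?_eq_getElem hi] at hmem
      simp only [List.mem_map] at hmem
      obtain ⟨p', hp', rfl⟩ := hmem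
      have hlen : (l.eraseIdx i).length = n := by
        rw [List.length_eraseIdx_of_lt hi]; omega
      have := (ih _ p' hlen).mp hp'
      exact ((this.cons l[i]).trans (List.getElem_cons_eraseIdx_perm hi))
    · intro hp
      have hne : l ≠ [] := by rintro rfl; simp at hl
      obtain ⟨a, p', rfl⟩ : ∃ a p', p = a :: p' := by
        cases p with
        | nil => exact absurd hp.symm.eq_nil hne
        | cons a p' => exact ⟨a, p', rfl⟩
      rw [List.cons_perm_iff_perm_erase] at hp
      obtain ⟨ha, hperm⟩ := hp
      refine ⟨l.idxOf a, List.idxOf_lt_length_of_mem ha, ?_⟩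
      rw [List.getElem?_eq_getElem (List.idxOf_lt_length_of_mem ha)]
      simp only [List.mem_map]
      refine ⟨p', ?_, by rw [List.getElem_idxOf]⟩
      have hlen : (l.eraseIdx (l.idxOf a)).length = n := by
        rw [List.length_eraseIdx_of_lt (List.idxOf_lt_length_of_mem ha)]; omega
      rw [ih _ p' hlen, ← List.erase_eq_eraseIdx_of_idxOf rfl]
      exact hperm

-- transport of Forall₂ along a permutation of the right list
theorem forall₂_perm_right {α β : Type} (R : α → β → Prop) :
    ∀ {l : List α} {p q : List β}, List.Forall₂ R l p → p.Perm q →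
      ∃ l', l'.Perm l ∧ List.Forall₂ R l' q := by
  intro l p q h hp
  induction hp generalizing l with
  | nil => exact ⟨l, List.Perm.refl l, by cases h; exact List.Forall₂.nil⟩
  | cons x _ ih =>
    cases h with
    | cons ha ht =>
      obtain ⟨l', hperm, hf⟩ := ih ht
      exact ⟨_ :: l', hperm.cons _, List.Forall₂.cons ha hf⟩
  | swap x y _ =>
    cases h with
    | cons ha ht =>
      cases ht with
      | cons hb htt =>
        exact ⟨_ :: _ :: _, List.Perm.swap _ _ _, List.Forall₂.cons hb (List.Forall₂.cons ha htt)⟩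
  | trans _ _ ih1 ih2 =>
    obtain ⟨l', h1, hf1⟩ := ih1 h
    obtain ⟨l'', h2, hf2⟩ := ih2 hf1
    exact ⟨l'', h2.trans h1, hf2⟩

-- transport of Forall₂ along a permutation of the left list
theorem forall₂_perm_left {α β : Type} (R : α → β → Prop) {l l' : List α} {q : List β}
    (h : List.Forall₂ R l q) (hp : l.Perm l') :
    ∃ q', q'.Perm q ∧ List.Forall₂ R l' q' := by
  obtain ⟨q', hq, hf⟩ := forall₂_perm_right (fun b a => R a b) h.flip hp
  exact ⟨q', hq, hf.flip⟩

-- characterisation of B's backtracking search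
theorem pvRec_iff (g2 : List (List (String × Option Int))) :
    ∀ avail, pvRec avail g2 = true ↔
      ∃ t, t.Subperm avail ∧ List.Forall₂ pvChk t g2 := by
  induction g2 with
  | nil =>
    intro avail
    simp only [pvRec, true_iff]
    exact ⟨[], List.nil_subperm, List.Forall₂.nil⟩
  | cons e2 rest ih =>
    intro avail
    simp only [pvRec, List.any_eq_true, List.mem_range, Bool.and_eq_true]
    constructor
    · rintro ⟨i, hi, hc, hr⟩
      obtain ⟨t, hsub, hf⟩ := (ih _).mp hr
      rw [← List.eraseIdx_eq_take_drop_succ] at hsub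
      refine ⟨avail[i] :: t, ?_, ?_⟩
      · have h1 : (avail[i] :: t).Subperm (avail[i] :: avail.eraseIdx i) :=
          (List.subperm_cons _).mpr hsub
        exact (List.Perm.subperm_left (List.getElem_cons_eraseIdx_perm hi)).mp h1
      · exact List.Forall₂.cons (by rwa [List.getD_eq_getElem avail [] hi] at hc) hf
    · rintro ⟨t, hsub, hf⟩
      cases hf with
      | cons hc hft =>
        rename_i x t'
        have hx : x ∈ avail := hsub.subset List.mem_cons_self
        have hi := List.idxOf_lt_length_of_mem hx
        refine ⟨avail.idxOf x, hi, ?_, ?_⟩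
        · rwa [List.getD_eq_getElem avail [] hi, List.getElem_idxOf]
        · rw [← List.eraseIdx_eq_take_drop_succ]
          refine (ih _).mpr ⟨t', ?_, hft⟩
          rw [← List.erase_eq_eraseIdx_of_idxOf rfl]
          have h2 : (x :: t').Subperm (x :: avail.erase x) :=
            (List.Perm.subperm_left (List.perm_cons_erase hx)).mp hsub
          exact (List.subperm_cons _).mp h2

-- pvZipAll on equal-length lists is Forall₂ of the (common) edge check
theorem pvZipAll_iff_forall₂ (c p : List (List (String × Option Int)))
    (hl : c.length = p.length) :
    pvZipAll c p = true ↔ List.Forall₂ pvChk c p := by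
  unfold pvZipAll
  rw [List.forall₂_iff_zip]
  simp only [List.all_eq_true, Prod.forall, pvChk]
  constructor
  · intro h; exact ⟨hl, fun hm => by rw [← pvCheckA_eq_pvCheckB]; exact h _ _ hm⟩
  · rintro ⟨-, h⟩ a b hm; rw [pvCheckA_eq_pvCheckB]; exact h hm

-- characterisation of A's product scan (the big branch)
theorem pvScan_iff (l1 l2 : List (List (String × Option Int))) :
    (((pvCombinations l1 l2.length).flatMap
      (fun c => (PySem.List.permutations l2 l2.length).map (fun p => (c, p)))).any
      (fun cp => pvZipAll (pvSortPart cp.1) cp.2)) = true ↔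
      ∃ t, t.Subperm l1 ∧ List.Forall₂ pvChk t l2 := by
  simp only [List.any_eq_true, List.mem_flatMap, List.mem_map]
  constructor
  · rintro ⟨cp, ⟨c, hc', p, hp', rfl⟩, hall⟩
    simp only at hall
    obtain ⟨hsub, hlen⟩ := (mem_pvCombinations l1 l2.length c).mp hc'
    have hperm : p.Perm l2 := (mem_pvPermutations l2.length l2 p rfl).mp hp'
    have hsp : (pvSortPart c).Perm c := PySem.List.sorted2_perm c _ _ false
    have hlens : (pvSortPart c).length = p.length := by
      rw [hsp.length_eq, hlen, hperm.length_eq]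
    have hf : List.Forall₂ pvChk (pvSortPart c) p :=
      (pvZipAll_iff_forall₂ _ _ hlens).mp hall
    obtain ⟨t, htp, htf⟩ := forall₂_perm_right pvChk hf hperm
    exact ⟨t, ⟨c, (htp.trans hsp).symm, hsub⟩, htf⟩
  · rintro ⟨t, hsub, hf⟩
    obtain ⟨s, hsp, hss⟩ := hsub
    have hlen : s.length = l2.length := by rw [hsp.length_eq, hf.length_eq]
    have hsrt : (pvSortPart s).Perm s := PySem.List.sorted2_perm s _ _ false
    have htp : t.Perm (pvSortPart s) := hsp.symm.trans hsrt.symm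
    obtain ⟨q, hq, hqf⟩ := forall₂_perm_left pvChk hf htp
    refine ⟨(s, q), ⟨s, (mem_pvCombinations l1 l2.length s).mpr ⟨hss, hlen⟩,
      ⟨q, (mem_pvPermutations l2.length l2 q rfl).mpr hq, rfl⟩⟩, ?_⟩
    refine (pvZipAll_iff_forall₂ _ _ ?_).mpr hqf
    rw [hsrt.length_eq, hlen, hq.length_eq]

-- ===== VERDICT (by name: the statement is the Claim_ definition above) =====
theorem edge_feasibility_spec : Claim_equal_edge_feasibility := by
  intro g1 g2 _dom _pre
  unfold Spec_edge_feasibility edge_feasibility edge_feasibility_alt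
  dsimp only
  have hs1 : (PySem.Dict.ofList g1).size = (PySem.Dict.ofList g1).values.length := by
    simp [PySem.Dict.size, PySem.Dict.values]
  have hs2 : (PySem.Dict.ofList g2).size = (PySem.Dict.ofList g2).values.length := by
    simp [PySem.Dict.size, PySem.Dict.values]
  rw [hs1, hs2]
  generalize (PySem.Dict.ofList g1).values = l1, (PySem.Dict.ofList g2).values = l2
  by_cases h0 : l2.length = 0
  · obtain rfl := List.length_eq_zero_iff.mp h0
    simp [pvRec]
  · rw [if_neg h0]
    by_cases hlt : l1.length < l2.length
    · rw [if_pos hlt, if_pos hlt]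
    · rw [if_neg hlt, if_neg hlt]
      by_cases hone : l1.length = 1 ∧ l2.length = 1
      · rw [if_pos hone]
        obtain ⟨x, rfl⟩ := List.length_eq_one_iff.mp hone.1
        obtain ⟨y, rfl⟩ := List.length_eq_one_iff.mp hone.2
        simp [pvRec, pvCheckA_eq_pvCheckB]
      · rw [if_neg hone, Bool.eq_iff_iff, pvScan_iff, pvRec_iff]
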